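-- pv_equiv track=rewrite | github.com/nrfulton/ace | pycparserext/typechecker/type_checker.py | transitive_sub_r
-- ===== SOURCE A (Python) =====
-- c99_substitutions = (
--                      #char
--                      ('char', 'uchar'),
--                      ('char', 'int'),
--                      #uchar
--                      ('uchar', 'char'),
--
--                      #int
--                      ('int', 'uint'),
--                      ('int', 'size_t'),
--                      ('int', 'long'),
--                      #uint
--                      ('uint','int'),
--
--                      #long
--                      ('long', 'ulong'),
--                      ('long', 'int'),
--                      #ulong
--                      ('ulong','long'),
--
--                      #size_t
--                      ('size_t', 'int'),
--                     )
--
-- def transitive_sub_r(given,expected,intermediate,tested):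
--     """Use trensitive_sub
--
--     intermediate = the current left hand size.
--
--     tested = a list of values that have already been attempted, and is used for
--     cycle avoidance.
--     """
--     if given == None or intermediate == None: return False
--     if intermediate == None: intermediate = given
--     tested.append(intermediate)
--     for s in c99_substitutions:
--         if s[0] == intermediate:
--             if s[1] == expected: return True
--             if not s[1] in tested:
--                 if transitive_sub_r(given,expected,s[1],tested):
--                     return True
--     return False
-- ===== SOURCE B (Python) =====
-- c99_substitutions = (
--                      ('char', 'uchar'),
--                      ('char', 'int'),
--                      ('uchar', 'char'),
--                      ('int', 'uint'),
--                      ('int', 'size_t'),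
--                      ('int', 'long'),
--                      ('uint','int'),
--                      ('long', 'ulong'),
--                      ('long', 'int'),
--                      ('ulong','long'),
--                      ('size_t', 'int'),
--                     )
--
-- def transitive_sub_r(given, expected, intermediate, tested):
--     """Iterative DFS with an explicit stack of (node, next-edge-index) frames
--     instead of recursion; appends to `tested` in the same order as the
--     recursive version."""
--     if given is None or intermediate is None:
--         return False
--     tested.append(intermediate)
--     stack = [[intermediate, 0]]
--     while stack:
--         node, k = stack[-1]
--         advanced = False
--         while k < len(c99_substitutions):
--             a, b = c99_substitutions[k]
--             k += 1
--             if a == node: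
--                 if b == expected:
--                     return True
--                 if b not in tested:
--                     stack[-1][1] = k
--                     tested.append(b)
--                     stack.append([b, 0])
--                     advanced = True
--                     break
--         if not advanced:
--             stack.pop()
--     return False
-- ===== Notes on version B (the rewrite author's own statement) =====
-- stated objective: alternative
-- what changed: The recursive DFS over the fixed substitution graph is replaced by an iterative DFS with an explicit stack of (node, next-edge-index) frames; the same tested-append order and check order (expected first, then cycle check) are kept, so the return value and the in-place mutation of tested are identical.
import Mathlib
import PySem

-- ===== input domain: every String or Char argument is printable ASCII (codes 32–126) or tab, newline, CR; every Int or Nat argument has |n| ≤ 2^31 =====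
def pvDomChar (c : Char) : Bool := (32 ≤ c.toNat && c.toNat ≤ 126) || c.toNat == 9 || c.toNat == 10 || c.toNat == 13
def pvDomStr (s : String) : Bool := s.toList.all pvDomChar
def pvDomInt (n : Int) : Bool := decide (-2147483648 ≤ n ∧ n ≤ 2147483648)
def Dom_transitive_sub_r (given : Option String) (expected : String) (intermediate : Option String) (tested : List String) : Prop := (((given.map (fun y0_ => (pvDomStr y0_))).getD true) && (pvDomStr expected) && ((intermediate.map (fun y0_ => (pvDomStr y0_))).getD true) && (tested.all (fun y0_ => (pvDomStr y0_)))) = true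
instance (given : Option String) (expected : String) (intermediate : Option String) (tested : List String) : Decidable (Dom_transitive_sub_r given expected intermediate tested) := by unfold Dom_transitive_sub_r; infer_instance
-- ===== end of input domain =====

-- B replaces the recursive DFS with an iterative one over an explicit stack of
-- (node, next-edge-index) frames (objective: alternative decomposition, same cost).
-- Both Pythons mutate `tested` in place with the identical append sequence; the
-- theorems below are about the RETURN value.

-- The fixed substitution graph (c99_substitutions).
def pvE : List (String × String) :=
  [("char","uchar"),("char","int"),("uchar","char"),("int","uint"),("int","size_t"),
   ("int","long"),("uint","int"),("long","ulong"),("long","int"),("ulong","long"),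
   ("size_t","int")]

-- Distinct edge targets; only used in the termination measure.
def pvN : List String := ["uchar","int","char","uint","size_t","long","ulong"]

-- Termination measure: number of graph targets not yet in `tested`.
def pvMu (t : List String) : Nat := (pvN.filter (fun x => !t.contains x)).length

theorem pvFilterLenMono {α : Type} (l : List α) (p q : α → Bool)
    (h : ∀ x, p x = true → q x = true) : (l.filter p).length ≤ (l.filter q).length := by
  induction l with
  | nil => simp
  | cons a l ih =>
    by_cases hp : p a = true
    · simp [hp, h a hp]; omega
    · simp only [List.filter_cons]
      rw [Bool.eq_false_iff.mpr hp]
      cases hq : q a <;> simp <;> omega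

theorem pvFilterLenStrict {α : Type} (l : List α) (p q : α → Bool) (b : α)
    (h : ∀ x, p x = true → q x = true) (hb : b ∈ l) (hpb : p b = false) (hqb : q b = true) :
    (l.filter p).length < (l.filter q).length := by
  induction l with
  | nil => cases hb
  | cons a l ih =>
    rcases List.mem_cons.mp hb with rfl | hb'
    · simp only [List.filter_cons, hpb, hqb]
      simp
      have := pvFilterLenMono l p q h
      omega
    · by_cases hp : p a = true
      · simp [hp, h a hp]
        exact ih hb'
      · simp only [List.filter_cons]
        rw [Bool.eq_false_iff.mpr hp]
        have := ih hb'
        cases hq : q a <;> simp <;> omega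

theorem pvMu_append_le (t Δ : List String) : pvMu (t ++ Δ) ≤ pvMu t := by
  apply pvFilterLenMono
  intro x hx
  simp only [Bool.not_eq_true', List.contains_eq_mem, decide_eq_false_iff_not,
    List.mem_append] at hx ⊢
  exact fun hm => hx (Or.inl hm)

theorem pvMu_append_lt (t : List String) (b : String) (hb : b ∈ pvN)
    (hnb : t.contains b = false) : pvMu (t ++ [b]) < pvMu t := by
  apply pvFilterLenStrict _ _ _ b
  · intro x hx
    simp only [Bool.not_eq_true', List.contains_eq_mem, decide_eq_false_iff_not,
      List.mem_append] at hx ⊢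
    exact fun hm => hx (Or.inl hm)
  · exact hb
  · simp
  · simpa [List.contains_eq_mem] using hnb

theorem pvE_targets : ∀ p ∈ pvE, p.2 ∈ pvN := by decide

-- Small named facts used by the termination proofs (kept as separate lemmas so
-- the definitions carry only tiny proof terms).
theorem pvELen : pvE.length = 11 := rfl

theorem pvStepLt (k : Nat) (h : k < pvE.length) :
    pvE.length + 1 - min (k+1) pvE.length < pvE.length + 1 - min k pvE.length := by
  rw [pvELen] at *; omega

theorem pvPopLt (k : Nat) (S : Nat) :
    S < pvE.length + 1 - min k pvE.length + S := by
  rw [pvELen]; omega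

theorem pvContainsFalse (t : List String) (b : String) (h : ¬ t.contains b = true) :
    t.contains b = false := by
  simpa using h

theorem pvTargetMem (k : Nat) (h : k < pvE.length) : pvE[k].2 ∈ pvN :=
  pvE_targets _ (pvE.getElem_mem h)

-- ===== PORT A =====
-- Port of A's recursive DFS.  `tested` mutation is modelled functionally: the
-- helper returns (result, Δ) where Δ is the list of nodes appended to `tested`
-- during the call (A appends `intermediate` on entry, here done by the caller
-- so that the recursion is on the loop index k over c99_substitutions).
def pvScanA (expected : String) (inter : String) (k : Nat) (t : List String) :
    Bool × List String :=
  if h : k < pvE.length then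
    if pvE[k].1 == inter then
      if pvE[k].2 == expected then (true, [])
      else if hm : t.contains pvE[k].2 then pvScanA expected inter (k+1) t
      else
        -- recursive call transitive_sub_r(given, expected, s[1], tested):
        -- its entry guard passes and it appends s[1] first.
        match pvScanA expected pvE[k].2 0 (t ++ [pvE[k].2]) with
        | (true, d) => (true, pvE[k].2 :: d)
        | (false, d) =>
          match pvScanA expected inter (k+1) (t ++ pvE[k].2 :: d) with
          | (r2, d2) => (r2, (pvE[k].2 :: d) ++ d2)
    else pvScanA expected inter (k+1) t
  else (false, [])
termination_by (pvMu t, pvE.length + 1 - min k pvE.length)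
decreasing_by
  · apply Prod.Lex.right'
    · exact le_refl _
    · exact pvStepLt k h
  · apply Prod.Lex.left
    exact pvMu_append_lt t _ (pvTargetMem k h) (pvContainsFalse t _ hm)
  · apply Prod.Lex.right'
    · exact pvMu_append_le t _
    · exact pvStepLt k h
  · apply Prod.Lex.right'
    · exact le_refl _
    · exact pvStepLt k h

def transitive_sub_r (given : Option String) (expected : String) (intermediate : Option String) (tested : List String) : Bool :=
  -- "if given == None or intermediate == None: return False"
  -- (the following "if intermediate == None: intermediate = given" is unreachable)
  match given, intermediate with
  | none, _ => false
  | some _, none => false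
  | some _, some inter =>
    -- tested.append(intermediate); for s in c99_substitutions: ...
    (pvScanA expected inter 0 (tested ++ [inter])).1

-- ===== PORT B =====
-- Port of B's iterative DFS: the stack holds (node, next-edge-index) frames;
-- one recursive step = one turn of B's inner scanning loop / pop / push.
def pvRunB (expected : String) (stack : List (String × Nat)) (t : List String) : Bool :=
  match stack with
  | [] => false
  | (node, k) :: rest =>
    if h : k < pvE.length then
      if pvE[k].1 == node then
        if pvE[k].2 == expected then true
        else if hm : t.contains pvE[k].2 then pvRunB expected ((node, k+1) :: rest) t
        else pvRunB expected ((pvE[k].2, 0) :: (node, k+1) :: rest) (t ++ [pvE[k].2])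
      else pvRunB expected ((node, k+1) :: rest) t
    else pvRunB expected rest t
termination_by (pvMu t, (stack.map (fun f => pvE.length + 1 - min f.2 pvE.length)).sum)
decreasing_by
  · apply Prod.Lex.right'
    · exact le_refl _
    · simp only [List.map_cons, List.sum_cons]
      exact Nat.add_lt_add_right (pvStepLt k h) _
  · apply Prod.Lex.left
    exact pvMu_append_lt t _ (pvTargetMem k h) (pvContainsFalse t _ hm)
  · apply Prod.Lex.right'
    · exact le_refl _
    · simp only [List.map_cons, List.sum_cons]
      exact Nat.add_lt_add_right (pvStepLt k h) _
  · apply Prod.Lex.right'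
    · exact le_refl _
    · simp only [List.map_cons, List.sum_cons]
      exact pvPopLt k _

def transitive_sub_r_alt (given : Option String) (expected : String) (intermediate : Option String) (tested : List String) : Bool :=
  match given, intermediate with
  | none, _ => false
  | some _, none => false
  | some _, some inter =>
    pvRunB expected [(inter, 0)] (tested ++ [inter])

-- ===== PRECONDITION & SPEC =====
def Spec_transitive_sub_r (given : Option String) (expected : String) (intermediate : Option String) (tested : List String) (out : Bool) : Prop := out = transitive_sub_r_alt given expected intermediate tested
instance (given : Option String) (expected : String) (intermediate : Option String) (tested : List String) (out : Bool) : Decidable (Spec_transitive_sub_r given expected intermediate tested out) := by unfold Spec_transitive_sub_r; infer_instance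

-- ===== CLAIM (what is proved, stated in full; the proofs are below) =====
def Claim_equal_transitive_sub_r : Prop := ∀ (given : Option String) (expected : String) (intermediate : Option String) (tested : List String), Dom_transitive_sub_r given expected intermediate tested → Spec_transitive_sub_r given expected intermediate tested (transitive_sub_r given expected intermediate tested)

-- ===== LEMMAS AND PROOFS =====

-- Key simulation lemma: running the machine with a top frame (node, k) equals
-- finishing that frame's scan (pvScanA) and, if it fails, continuing with the
-- rest of the stack on the extended tested list.
theorem pvRunB_frame (expected : String) :
    ∀ (node : String) (k : Nat) (t : List String) (rest : List (String × Nat)),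
    pvRunB expected ((node, k) :: rest) t =
      ((pvScanA expected node k t).1 ||
        pvRunB expected rest (t ++ (pvScanA expected node k t).2)) := by
  intro node k t
  induction node, k, t using pvScanA.induct expected with
  | case1 inter k t h ha he =>
    intro rest
    conv_lhs => rw [pvRunB.eq_def]
    conv_rhs => rw [pvScanA.eq_def]
    simp [h, ha, he]
  | case2 inter k t h ha he hc ih =>
    intro rest
    conv_lhs => rw [pvRunB.eq_def]
    conv_rhs => rw [pvScanA.eq_def]
    simp only [dif_pos h, ha, he, hc, if_true, if_false, Bool.false_eq_true, dite_eq_ite]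
    exact ih rest
  | case3 inter k t h ha he hc d hscan ih =>
    intro rest
    conv_lhs => rw [pvRunB.eq_def]
    conv_rhs => rw [pvScanA.eq_def]
    simp only [dif_pos h, ha, he, hc, if_true, if_false, Bool.false_eq_true, dite_eq_ite, hscan]
    rw [ih ((inter, k+1) :: rest)]
    simp [hscan]
  | case4 inter k t h ha he hc d hscan r2 d2 hscan2 ih1 ih2 =>
    intro rest
    conv_lhs => rw [pvRunB.eq_def]
    conv_rhs => rw [pvScanA.eq_def]
    simp only [dif_pos h, ha, he, hc, if_true, if_false, Bool.false_eq_true, dite_eq_ite, hscan, hscan2]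
    rw [ih1 ((inter, k+1) :: rest)]
    simp only [hscan, Bool.false_or, List.append_assoc, List.singleton_append]
    rw [ih2 rest]
    simp [hscan2, List.append_assoc]
  | case5 inter k t h ha ih =>
    intro rest
    conv_lhs => rw [pvRunB.eq_def]
    conv_rhs => rw [pvScanA.eq_def]
    simp only [dif_pos h, ha, if_false, Bool.false_eq_true]
    exact ih rest
  | case6 inter k t h =>
    intro rest
    conv_lhs => rw [pvRunB.eq_def]
    conv_rhs => rw [pvScanA.eq_def]
    simp [h]

theorem transitive_sub_r_spec : Claim_equal_transitive_sub_r := by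
  intro given expected intermediate tested _
  unfold Spec_transitive_sub_r transitive_sub_r transitive_sub_r_alt
  match given, intermediate with
  | none, _ => rfl
  | some g, none => rfl
  | some g, some inter =>
    simp only
    rw [pvRunB_frame]
    rw [pvRunB.eq_def]
    simp
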